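-- pv_equiv track=rewrite | github.com/sarajaksa/schoolwork | evolutionary_algoritms/eight-queens-hill-climbing.py | check_attack
-- ===== SOURCE A (Python) =====
-- def check_attack(queens):
--     attacked_queens = 0
--     for i, queen in enumerate(queens):
--         for j, element in enumerate(queens):
--             if i == j:
--                 continue
--             if abs(i-j) == abs(queen - element):
--                 attacked_queens += 1
--                 break
--     return attacked_queens
-- ===== SOURCE B (Python) =====
-- def check_attack(queens):
--     d1 = {}
--     d2 = {}
--     for i, q in enumerate(queens):
--         d1[i - q] = d1.get(i - q, 0) + 1
--         d2[i + q] = d2.get(i + q, 0) + 1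
--     attacked = 0
--     for i, q in enumerate(queens):
--         if d1[i - q] > 1 or d2[i + q] > 1:
--             attacked += 1
--     return attacked
-- ===== Notes on version B (the rewrite author's own statement) =====
-- stated objective: faster
-- what changed: Replaced the nested all-pairs scan with two hash-map diagonal buckets (keyed by i-q and i+q) built in one pass; a queen is attacked iff either of its buckets holds more than one queen.
import Mathlib
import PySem

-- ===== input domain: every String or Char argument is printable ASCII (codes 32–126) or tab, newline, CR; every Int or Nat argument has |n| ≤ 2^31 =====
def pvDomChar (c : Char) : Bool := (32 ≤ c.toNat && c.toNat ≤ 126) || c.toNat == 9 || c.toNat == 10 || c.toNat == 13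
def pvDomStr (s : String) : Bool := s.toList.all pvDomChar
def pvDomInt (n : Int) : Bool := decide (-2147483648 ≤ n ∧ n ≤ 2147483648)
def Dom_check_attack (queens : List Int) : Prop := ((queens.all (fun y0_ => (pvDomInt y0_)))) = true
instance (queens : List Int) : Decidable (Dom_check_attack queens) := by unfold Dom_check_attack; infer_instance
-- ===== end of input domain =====

-- B replaces A's quadratic all-pairs scan by two one-pass diagonal-bucket dictionaries (objective: faster).

-- ===== PORT A =====
-- inner 'for j, element in enumerate(queens)' loop with continue/break
def check_attack_inner (i queen : Int) (acc : Int) : List (Int × Int) → Int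
  | [] => acc
  | (j, element) :: rest =>
    if i = j then check_attack_inner i queen acc rest
    else if |i - j| = |queen - element| then acc + 1
    else check_attack_inner i queen acc rest

def check_attack (queens : List Int) : Int :=
  (PySem.List.enumerate queens 0).foldl
    (fun acc p => check_attack_inner p.1 p.2 acc (PySem.List.enumerate queens 0)) 0

-- ===== PORT B =====
def check_attack_alt (queens : List Int) : Int :=
  let e := PySem.List.enumerate queens 0
  -- one loop filling both diagonal-bucket dicts: d[k] = d.get(k, 0) + 1
  let ds := e.foldl
    (fun (ds : PySem.Dict Int Int × PySem.Dict Int Int) p =>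
      (ds.1.modify (p.1 - p.2) 0 (· + 1), ds.2.modify (p.1 + p.2) 0 (· + 1)))
    (PySem.Dict.empty, PySem.Dict.empty)
  e.foldl (fun acc p =>
    if ds.1.getD (p.1 - p.2) 0 > 1 ∨ ds.2.getD (p.1 + p.2) 0 > 1 then acc + 1 else acc) 0

-- ===== PRECONDITION & SPEC =====
def Spec_check_attack (queens : List Int) (out : Int) : Prop := out = check_attack_alt queens
instance (queens : List Int) (out : Int) : Decidable (Spec_check_attack queens out) := by unfold Spec_check_attack; infer_instance

-- ===== CLAIM (what is proved, stated in full; the proofs are below) =====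
def Claim_equal_check_attack : Prop := ∀ (queens : List Int), Dom_check_attack queens → Spec_check_attack queens (check_attack queens)

-- ===== LEMMAS AND PROOFS =====

-- A's inner loop adds 1 exactly when some other queen shares a diagonal with (i, queen)
theorem check_attack_inner_eq (i queen : Int) (l : List (Int × Int)) (acc : Int) :
    check_attack_inner i queen acc l =
      if l.any (fun p => decide (p.1 ≠ i ∧ |i - p.1| = |queen - p.2|)) then acc + 1 else acc := by
  induction l with
  | nil => simp [check_attack_inner]
  | cons hd tl ih =>
    obtain ⟨j, element⟩ := hd
    simp only [check_attack_inner, List.any_cons]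
    by_cases hij : i = j
    · subst hij
      rw [if_pos rfl, ih]
      simp only [show decide (i ≠ i ∧ |i - i| = |queen - element|) = false from by simp,
        Bool.false_or]
    · by_cases habs : |i - j| = |queen - element|
      · simp [hij, habs, Ne.symm hij]
      · rw [if_neg hij, if_neg habs, ih]
        simp only [show decide (j ≠ i ∧ |i - j| = |queen - element|) = false from by simp [habs],
          Bool.false_or]

-- counted-bucket fold = count of the key over the mapped key list
theorem getD_bucket (e : List (Int × Int)) (f : Int × Int → Int) (k : Int) :
    (e.foldl (fun d p => d.modify (f p) 0 (· + 1)) (PySem.Dict.empty : PySem.Dict Int Int)).getD k 0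
      = ((e.map f).count k : Int) := by
  rw [← List.foldl_map (f := f) (g := fun (d : PySem.Dict Int Int) (x : Int) => d.modify x 0 (· + 1))]
  simp [PySem.Dict.getD_foldl_modify_add_one]

-- >1 occurrences of the key f a in a nodup list iff a second element shares the key
theorem one_lt_countP_iff {α : Type} [DecidableEq α] {β : Type} [DecidableEq β]
    (l : List α) (hnd : l.Nodup) (a : α) (ha : a ∈ l) (f : α → β) :
    1 < l.countP (fun b => f b == f a) ↔ ∃ b ∈ l, b ≠ a ∧ f b = f a := by
  obtain ⟨s, t, rfl⟩ := List.append_of_mem ha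
  rw [List.nodup_append] at hnd
  have has : a ∉ s := fun h => hnd.2.2 a h a (List.mem_cons_self) rfl
  have hat : a ∉ t := (List.nodup_cons.mp hnd.2.1).1
  simp only [List.countP_append, List.countP_cons, beq_self_eq_true, if_pos]
  constructor
  · intro h
    have h2 : 0 < s.countP (fun b => f b == f a) ∨ 0 < t.countP (fun b => f b == f a) := by
      omega
    rcases h2 with h' | h' <;> obtain ⟨b, hb, hfb⟩ := List.countP_pos_iff.mp h' <;>
      simp only [beq_iff_eq] at hfb
    · exact ⟨b, by simp [hb], fun h => has (h ▸ hb), hfb⟩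
    · exact ⟨b, by simp [hb], fun h => hat (h ▸ hb), hfb⟩
  · rintro ⟨b, hb, hba, hfb⟩
    simp only [List.mem_append, List.mem_cons] at hb
    rcases hb with hb | hb | hb
    · have : 0 < s.countP (fun b => f b == f a) :=
        List.countP_pos_iff.mpr ⟨b, hb, by simp [hfb]⟩
      omega
    · exact absurd hb hba
    · have : 0 < t.countP (fun b => f b == f a) :=
        List.countP_pos_iff.mpr ⟨b, hb, by simp [hfb]⟩
      omega

theorem one_lt_count_map_iff {α : Type} [DecidableEq α]
    (l : List α) (hnd : l.Nodup) (a : α) (ha : a ∈ l) (f : α → Int) :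
    1 < (l.map f).count (f a) ↔ ∃ b ∈ l, b ≠ a ∧ f b = f a := by
  rw [List.count_eq_countP, List.countP_map, ← one_lt_countP_iff l hnd a ha f]
  rfl

theorem enumerate_nodup (queens : List Int) : (PySem.List.enumerate queens 0).Nodup := by
  have h := PySem.List.pairwise_lt_enumerate (xs := queens) (s := 0)
  exact h.imp (fun hlt he => absurd (he ▸ hlt) (lt_irrefl _))

theorem fst_inj_enumerate (queens : List Int) (p q : Int × Int)
    (hp : p ∈ PySem.List.enumerate queens 0) (hq : q ∈ PySem.List.enumerate queens 0)
    (h : p.1 = q.1) : p = q := by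
  rw [PySem.List.mem_enumerate_iff] at hp hq
  obtain ⟨k, hk, rfl⟩ := hp
  obtain ⟨m, hm, rfl⟩ := hq
  simp at h
  subst h
  rfl

-- ===== VERDICT (by name: the statement is the Claim_ definition above) =====
theorem check_attack_spec : Claim_equal_check_attack := by
  intro queens _
  unfold Spec_check_attack
  simp only [check_attack, check_attack_alt]
  rw [PySem.List.foldl_prod_mk
      (f := fun (d : PySem.Dict Int Int) (p : Int × Int) => d.modify (p.1 - p.2) 0 (· + 1))
      (g := fun (d : PySem.Dict Int Int) (p : Int × Int) => d.modify (p.1 + p.2) 0 (· + 1))]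
  set e := PySem.List.enumerate queens 0 with he
  have hnd : e.Nodup := enumerate_nodup queens
  apply PySem.List.foldl_congr_mem
  intro acc p hp
  rw [check_attack_inner_eq]
  simp only [getD_bucket]
  congr 1
  rw [List.any_eq_true]
  simp only [decide_eq_true_eq]
  rw [show ((1:Int) < ((e.map (fun p => p.1 - p.2)).count (p.1 - p.2) : Int) ∨
       (1:Int) < ((e.map (fun p => p.1 + p.2)).count (p.1 + p.2) : Int)) ↔
      (1 < (e.map (fun q => q.1 - q.2)).count (p.1 - p.2) ∨
       1 < (e.map (fun q => q.1 + q.2)).count (p.1 + p.2)) from by omega]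
  rw [eq_iff_iff]
  rw [one_lt_count_map_iff e hnd p hp (fun q => q.1 - q.2),
      one_lt_count_map_iff e hnd p hp (fun q => q.1 + q.2)]
  constructor
  · rintro ⟨q, hq, hne, habs⟩
    rcases abs_eq_abs.mp habs with h | h
    · exact Or.inl ⟨q, hq, fun hqe => hne (hqe ▸ rfl), by omega⟩
    · exact Or.inr ⟨q, hq, fun hqe => hne (hqe ▸ rfl), by omega⟩
  · rintro (⟨q, hq, hne, hk⟩ | ⟨q, hq, hne, hk⟩) <;>
      refine ⟨q, hq, fun h1 => hne (fst_inj_enumerate queens q p hq hp h1),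
        abs_eq_abs.mpr ?_⟩
    · left; omega
    · right; omega
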